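-- pv_equiv track=rewrite | github.com/bilone/Hackerrank | www.hackerrank.com/Alghorithms/Strings/Two characters.py | isTtype
-- ===== SOURCE A (Python) =====
-- def isTtype(s):
--     l1=[]
--     l2=[]
--     res=False
--     for i in range(len(s)):
--         if i%2==0:
--             l1.append(s[i])
--         if i%2==1:
--             l2.append(s[i])
--     s1=set(l1)
--     s2=set(l2)
--     if s1!=s2 and len(s1)==len(s2)==1:
--         res=True
--     return(res)
-- ===== SOURCE B (Python) =====
-- def isTtype(s):
--     if len(s) < 2:
--         return False
--     a, b = s[0], s[1]
--     if a == b: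
--         return False
--     expected = a
--     for c in s:
--         if c != expected:
--             return False
--         expected = b if expected == a else a
--     return True
-- ===== Notes on version B (the rewrite author's own statement) =====
-- stated objective: simpler
-- what changed: Replaces the index loop that builds two lists and compares their sets with a guard (len<2, s[0]==s[1]) plus a single early-exit pass comparing each character against a toggling expected value; no collections are built.
import Mathlib
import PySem

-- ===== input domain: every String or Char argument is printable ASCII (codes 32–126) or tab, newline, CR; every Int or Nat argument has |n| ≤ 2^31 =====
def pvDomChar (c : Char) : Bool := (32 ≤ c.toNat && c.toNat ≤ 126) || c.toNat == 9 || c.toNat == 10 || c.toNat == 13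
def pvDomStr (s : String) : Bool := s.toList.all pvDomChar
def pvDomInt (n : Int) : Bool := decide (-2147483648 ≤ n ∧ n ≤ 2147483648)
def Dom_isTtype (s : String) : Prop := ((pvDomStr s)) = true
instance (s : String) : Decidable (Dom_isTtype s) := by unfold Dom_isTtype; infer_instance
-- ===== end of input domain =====

-- B replaces A's two-lists-and-set-comparison construction by a guard plus one early-exit
-- pass comparing each character with a toggling expected character (objective: simpler).

-- ===== PORT A =====
-- for i in range(len(s)): if i%2==0: l1.append(s[i]); if i%2==1: l2.append(s[i])
def isTtype (s : String) : Bool :=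
  let cs := s.toList
  let st := (PySem.List.pyRange 0 (cs.length : Int) 1).foldl
    (fun (st : List Char × List Char) i =>
      let st := if i % 2 == 0 then (st.1 ++ [PySem.List.pyGetD cs i ' '], st.2) else st
      let st := if i % 2 == 1 then (st.1, st.2 ++ [PySem.List.pyGetD cs i ' ']) else st
      st) ([], [])
  let s1 : PySem.Set Char := PySem.Set.ofList st.1
  let s2 : PySem.Set Char := PySem.Set.ofList st.2
  if (!(PySem.Set.equal s1 s2)) && (PySem.Set.len s1 == PySem.Set.len s2) && (PySem.Set.len s2 == 1) then
    true
  else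
    false

-- ===== PORT B =====
-- 'for c in s: if c != expected: return False; expected = toggle' as structural recursion
def altLoop (a b expected : Char) : List Char → Bool
  | [] => true
  | c :: rest => if c != expected then false else altLoop a b (if expected == a then b else a) rest

def isTtype_alt (s : String) : Bool :=
  match s.toList with
  | c0 :: c1 :: _ =>           -- len(s) >= 2; a = s[0], b = s[1]
    if c0 == c1 then false
    else altLoop c0 c1 c0 s.toList
  | _ => false                 -- len(s) < 2

-- ===== PRECONDITION & SPEC =====
def Spec_isTtype (s : String) (out : Bool) : Prop := out = isTtype_alt s
instance (s : String) (out : Bool) : Decidable (Spec_isTtype s out) := by unfold Spec_isTtype; infer_instance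

-- ===== CLAIM (what is proved, stated in full; the proofs are below) =====
def Claim_equal_isTtype : Prop := ∀ (s : String), Dom_isTtype s → Spec_isTtype s (isTtype s)

-- ===== LEMMAS AND PROOFS =====

-- characters of cs at even / odd positions, in order
mutual
def evens : List Char → List Char
  | [] => []
  | c :: rest => c :: odds rest
def odds : List Char → List Char
  | [] => []
  | _ :: rest => evens rest
end

-- A's index loop, rebased to a Nat range with a parity phase, splits cs into evens/odds
theorem fold_phase (cs : List Char) : ∀ (ph : Nat) (acc1 acc2 : List Char),
    (List.range cs.length).foldl (fun (st : List Char × List Char) k =>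
      if (k + ph) % 2 = 0 then (st.1 ++ [cs.getD k ' '], st.2) else (st.1, st.2 ++ [cs.getD k ' ']))
      (acc1, acc2)
    = if ph % 2 = 0 then (acc1 ++ evens cs, acc2 ++ odds cs)
      else (acc1 ++ odds cs, acc2 ++ evens cs) := by
  induction cs with
  | nil => intro ph a1 a2; simp [evens, odds]
  | cons c rest ih =>
    intro ph a1 a2
    rw [List.length_cons, List.range_succ_eq_map]
    simp only [List.foldl_cons, List.foldl_map]
    have hfun : (fun (st : List Char × List Char) (k : Nat) =>
        if (Nat.succ k + ph) % 2 = 0 then (st.1 ++ [(c :: rest).getD (Nat.succ k) ' '], st.2)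
        else (st.1, st.2 ++ [(c :: rest).getD (Nat.succ k) ' ']))
        = (fun (st : List Char × List Char) (k : Nat) =>
        if (k + (ph + 1)) % 2 = 0 then (st.1 ++ [rest.getD k ' '], st.2)
        else (st.1, st.2 ++ [rest.getD k ' '])) := by
      funext st k
      have h : Nat.succ k + ph = k + (ph + 1) := by omega
      rw [h]
      rfl
    rw [hfun]
    simp only [Nat.zero_add, List.getD_cons_zero]
    rcases Nat.mod_two_eq_zero_or_one ph with h | h
    · have h' : (ph + 1) % 2 = 1 := by omega
      rw [if_pos h, ih (ph + 1), if_neg (by omega), if_pos h]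
      simp [evens, odds]
    · have h' : (ph + 1) % 2 = 0 := by omega
      rw [if_neg (by omega), ih (ph + 1), if_pos h', if_neg (by omega)]
      simp [evens, odds]

-- the port's fold over pyRange equals (evens cs, odds cs)
theorem foldA_eq (cs : List Char) :
    (PySem.List.pyRange 0 (cs.length : Int) 1).foldl
      (fun (st : List Char × List Char) i =>
        let st := if i % 2 == 0 then (st.1 ++ [PySem.List.pyGetD cs i ' '], st.2) else st
        let st := if i % 2 == 1 then (st.1, st.2 ++ [PySem.List.pyGetD cs i ' ']) else st
        st) ([], [])
    = (evens cs, odds cs) := by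
  rw [PySem.List.pyRange_one]
  have hlen : ((cs.length : Int) - 0).toNat = cs.length := by omega
  rw [hlen, List.foldl_map]
  have hfun : (fun (st : List Char × List Char) (k : Nat) =>
      let st' := if ((0 : Int) + k) % 2 == 0 then (st.1 ++ [PySem.List.pyGetD cs ((0 : Int) + k) ' '], st.2) else st
      let st'' := if ((0 : Int) + k) % 2 == 1 then (st'.1, st'.2 ++ [PySem.List.pyGetD cs ((0 : Int) + k) ' ']) else st'
      st'')
      = (fun (st : List Char × List Char) (k : Nat) =>
      if (k + 0) % 2 = 0 then (st.1 ++ [cs.getD k ' '], st.2) else (st.1, st.2 ++ [cs.getD k ' '])) := by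
    funext st k
    have hz : ((0 : Int) + (k : Int)) = (k : Int) := by omega
    rcases Nat.mod_two_eq_zero_or_one k with h | h
    · have h0 : ((k : Int)) % 2 = 0 := by omega
      simp [hz, h0, h]
    · have h1 : ((k : Int)) % 2 = 1 := by omega
      simp [hz, h1, h]
  rw [hfun, fold_phase cs 0 [] []]
  simp

-- B's toggling scan checked against evens/odds
theorem altLoop_pair (a b : Char) (hab : ¬ a = b) : ∀ cs : List Char,
    altLoop a b a cs = ((evens cs).all (· == a) && (odds cs).all (· == b)) ∧
    altLoop a b b cs = ((evens cs).all (· == b) && (odds cs).all (· == a)) := by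
  intro cs
  induction cs with
  | nil => simp [altLoop, evens, odds]
  | cons c rest ih =>
    have hba : (b == a) = false := by simp [Ne.symm hab]
    constructor
    · by_cases hc : c = a
      · simp [altLoop, evens, odds, hc, ih.2, Bool.and_comm]
      · simp [altLoop, evens, odds, hc]
    · by_cases hc : c = b
      · simp [altLoop, evens, odds, hc, hba, ih.1, Bool.and_comm]
      · simp [altLoop, evens, odds, hc]

-- a set built from c :: t where every element of t is c is the singleton [c]
theorem ofList_const (c : Char) (t : List Char) (h : ∀ x ∈ t, x = c) :
    PySem.Set.ofList (c :: t) = [c] := by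
  rw [PySem.Set.ofList_cons]
  have : (PySem.Set.ofList t).discard c = [] := by
    apply List.eq_nil_iff_forall_not_mem.mpr
    intro y hy
    rw [PySem.Set.mem_discard] at hy
    exact hy.2 (h y ((PySem.Set.mem_ofList _ _).mp hy.1))
  rw [this]

-- a singleton set forces all elements equal to the head
theorem len_one_const (c : Char) (t : List Char)
    (h : PySem.Set.len (PySem.Set.ofList (c :: t)) = 1) : ∀ x ∈ t, x = c := by
  intro x hx
  have hlen : (PySem.Set.ofList (c :: t)).length = 1 := by
    simp [PySem.Set.len] at h
    omega
  obtain ⟨a, ha⟩ := List.length_eq_one_iff.mp hlen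
  have hc : c ∈ PySem.Set.ofList (c :: t) := (PySem.Set.mem_ofList _ _).mpr (by simp)
  have hx' : x ∈ PySem.Set.ofList (c :: t) := (PySem.Set.mem_ofList _ _).mpr (by simp [hx])
  rw [ha] at hc hx'
  simp at hc hx'
  rw [hx', hc]


-- bodies of the two ports as functions of the character list
def bodyA (cs : List Char) : Bool :=
  let st := (PySem.List.pyRange 0 (cs.length : Int) 1).foldl
    (fun (st : List Char × List Char) i =>
      let st := if i % 2 == 0 then (st.1 ++ [PySem.List.pyGetD cs i ' '], st.2) else st
      let st := if i % 2 == 1 then (st.1, st.2 ++ [PySem.List.pyGetD cs i ' ']) else st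
      st) ([], [])
  let s1 : PySem.Set Char := PySem.Set.ofList st.1
  let s2 : PySem.Set Char := PySem.Set.ofList st.2
  if (!(PySem.Set.equal s1 s2)) && (PySem.Set.len s1 == PySem.Set.len s2) && (PySem.Set.len s2 == 1) then
    true
  else
    false

def bodyB (cs : List Char) : Bool :=
  match cs with
  | c0 :: c1 :: _ =>
    if c0 == c1 then false
    else altLoop c0 c1 c0 cs
  | _ => false

theorem isTtype_eq_bodyA (s : String) : isTtype s = bodyA s.toList := rfl

theorem alt_eq_bodyB (s : String) : isTtype_alt s = bodyB s.toList := rfl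

theorem len_one_iff (c : Char) (t : List Char) :
    (PySem.Set.ofList (c :: t)).length = 1 ↔ ∀ x ∈ t, x = c := by
  constructor
  · intro h; exact len_one_const c t (by simp [PySem.Set.len, h])
  · intro h; rw [ofList_const c t h]; rfl

theorem body_eq (cs : List Char) : bodyA cs = bodyB cs := by
  rcases cs with _ | ⟨c0, _ | ⟨c1, rest⟩⟩
  · decide
  · have h1 : PySem.Set.ofList [c0] = [c0] := ofList_const c0 [] (by simp)
    unfold bodyA
    rw [foldA_eq [c0]]
    simp only [evens, odds]
    simp [h1, bodyB, PySem.Set.len, PySem.Set.ofList_nil]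
  · have hA : bodyA (c0 :: c1 :: rest)
        = ((!(PySem.Set.equal (PySem.Set.ofList (c0 :: evens rest)) (PySem.Set.ofList (c1 :: odds rest))))
           && (PySem.Set.len (PySem.Set.ofList (c0 :: evens rest)) == PySem.Set.len (PySem.Set.ofList (c1 :: odds rest)))
           && (PySem.Set.len (PySem.Set.ofList (c1 :: odds rest)) == 1)) := by
      unfold bodyA
      rw [foldA_eq (c0 :: c1 :: rest)]
      simp only [evens, odds]
      split <;> simp_all
    rw [hA]
    by_cases hc : c0 = c1
    · have hB : bodyB (c0 :: c1 :: rest) = false := by simp [bodyB, hc]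
      rw [hB]
      by_cases h2 : ∀ x ∈ odds rest, x = c1
      · by_cases h1 : ∀ x ∈ evens rest, x = c0
        · rw [ofList_const c0 _ h1, ofList_const c1 _ h2]
          have : PySem.Set.equal [c0] [c1] = true :=
            (PySem.Set.equal_iff _ _).mpr (by simp [hc])
          simp [this]
        · have hl1 : (PySem.Set.ofList (c0 :: evens rest)).length ≠ 1 :=
            fun h => h1 ((len_one_iff _ _).mp h)
          simp
          intro _ h
          omega
      · have hl2 : (PySem.Set.ofList (c1 :: odds rest)).length ≠ 1 :=
          fun h => h2 ((len_one_iff _ _).mp h)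
        simp
        intro _ _
        omega
    · have hB : bodyB (c0 :: c1 :: rest)
          = ((evens rest).all (· == c0) && (odds rest).all (· == c1)) := by
        have h := (altLoop_pair c0 c1 hc (c0 :: c1 :: rest)).1
        simp only [bodyB, beq_iff_eq, if_neg hc, h, evens, odds]
        simp
      rw [hB]
      by_cases h1 : ∀ x ∈ evens rest, x = c0
      · by_cases h2 : ∀ x ∈ odds rest, x = c1
        · rw [ofList_const c0 _ h1, ofList_const c1 _ h2]
          have hne : PySem.Set.equal [c0] [c1] = false := by
            rw [Bool.eq_false_iff]
            intro h
            have := ((PySem.Set.equal_iff _ _).mp h c0).mp (by simp)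
            simp at this
            exact hc this
          simp [hne, PySem.Set.len, List.all_eq_true]
          exact ⟨h1, h2⟩
        · have hl2 : (PySem.Set.ofList (c1 :: odds rest)).length ≠ 1 :=
            fun h => h2 ((len_one_iff _ _).mp h)
          have hall : (odds rest).all (· == c1) = false := by
            rw [Bool.eq_false_iff]
            simpa [List.all_eq_true] using h2
          simp [hall]
          intro _ _
          omega
      · have hl1 : (PySem.Set.ofList (c0 :: evens rest)).length ≠ 1 :=
          fun h => h1 ((len_one_iff _ _).mp h)
        have hall : (evens rest).all (· == c0) = false := by
          rw [Bool.eq_false_iff]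
          simpa [List.all_eq_true] using h1
        simp [hall]
        intro _ h
        omega

-- ===== VERDICT (by name: the statement is the Claim_ definition above) =====
theorem isTtype_spec : Claim_equal_isTtype := by
  intro s _
  show isTtype s = isTtype_alt s
  rw [isTtype_eq_bodyA, alt_eq_bodyB, body_eq]
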